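-- pv_equiv track=rewrite | github.com/Dorthion/Python-Minigames | Battleships/Source/battleships_functions_play.py | Player_shot
-- ===== SOURCE A (Python) =====
-- def shot(Map1,y,x):
--     if Map1[y][x] in [3, 4, 5]:
--         return Map1, False
--     if Map1[y][x] == 1:
--         Map1[y][x] = 3
--     if Map1[y][x] in [0, 2]:
--         Map1[y][x] = 4
--     return Map1, True
--
-- def Player_shot(Map1,y,x):
--     xi = 0
--     yi = 0
--
--     if x - 32 > 0:
--         while x - 34*xi > 0:
--             xi = xi + 1
--         xi = xi - 1
--     if y - 32 > 0:
--         while y - 34*yi > 0: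
--             yi = yi + 1
--         yi = yi - 1
--     Map1 = shot(Map1,yi,xi)
--     return Map1
-- ===== SOURCE B (Python) =====
-- # Same result/mutation as A; grid indices computed by floor division instead of counting loops.
-- def shot(Map1, y, x):
--     v = Map1[y][x]
--     if v in (3, 4, 5):
--         return Map1, False
--     Map1[y][x] = {1: 3, 0: 4, 2: 4}.get(v, v)
--     return Map1, True
--
-- def Player_shot(Map1, y, x):
--     return shot(Map1, max(0, (y - 1) // 34), max(0, (x - 1) // 34))
-- ===== Notes on version B (the rewrite author's own statement) =====
-- stated objective: simpler
-- what changed: Both counting while-loops are replaced by a closed-form floor division max(0,(c-1)//34) for each coordinate, and the shot helper's if-chain is collapsed to one table-driven assignment.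
import Mathlib
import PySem

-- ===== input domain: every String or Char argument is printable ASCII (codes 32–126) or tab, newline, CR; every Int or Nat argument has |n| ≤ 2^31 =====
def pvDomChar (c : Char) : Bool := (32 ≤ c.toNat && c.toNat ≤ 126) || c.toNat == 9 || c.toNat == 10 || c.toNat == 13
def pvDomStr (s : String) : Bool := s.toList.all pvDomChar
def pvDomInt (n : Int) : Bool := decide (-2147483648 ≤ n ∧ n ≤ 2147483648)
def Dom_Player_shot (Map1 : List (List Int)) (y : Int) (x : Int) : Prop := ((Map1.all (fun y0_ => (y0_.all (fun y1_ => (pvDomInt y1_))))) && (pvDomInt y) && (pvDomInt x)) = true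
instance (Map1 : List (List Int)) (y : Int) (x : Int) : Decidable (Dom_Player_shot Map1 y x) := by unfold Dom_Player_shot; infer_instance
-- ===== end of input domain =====

-- B replaces A's counting while-loops by closed-form floor divisions (objective: simpler).
-- Both Pythons mutate Map1 in place identically; the equivalence proved here is about the return value.

-- ===== PORT A =====
-- helper `shot`, transliterated (indexing via pyGetD/pySetD; in range under Pre_)
def pyShot (Map1 : List (List Int)) (y : Int) (x : Int) : List (List Int) × Bool :=
  let v := PySem.List.pyGetD (PySem.List.pyGetD Map1 y []) x 0
  if v = 3 ∨ v = 4 ∨ v = 5 then (Map1, false)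
  else
    let M1 := if v = 1 then PySem.List.pySetD Map1 y (PySem.List.pySetD (PySem.List.pyGetD Map1 y []) x 3) else Map1
    let v2 := PySem.List.pyGetD (PySem.List.pyGetD M1 y []) x 0
    let M2 := if v2 = 0 ∨ v2 = 2 then PySem.List.pySetD M1 y (PySem.List.pySetD (PySem.List.pyGetD M1 y []) x 4) else M1
    (M2, true)

-- the `while c - 34*i > 0: i += 1` loop
def gridLoop (c : Int) (i : Int) : Int :=
  if c - 34 * i > 0 then gridLoop c (i + 1) else i
termination_by (c - 34 * i).toNat
decreasing_by omega

def Player_shot (Map1 : List (List Int)) (y : Int) (x : Int) : List (List Int) × Bool :=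
  let xi := if x - 32 > 0 then gridLoop x 0 - 1 else 0
  let yi := if y - 32 > 0 then gridLoop y 0 - 1 else 0
  pyShot Map1 yi xi

-- ===== PORT B =====
-- B's shot: one table-driven assignment ({1:3, 0:4, 2:4}.get(v, v))
def shotB (Map1 : List (List Int)) (y : Int) (x : Int) : List (List Int) × Bool :=
  let v := PySem.List.pyGetD (PySem.List.pyGetD Map1 y []) x 0
  if v = 3 ∨ v = 4 ∨ v = 5 then (Map1, false)
  else
    (PySem.List.pySetD Map1 y
      (PySem.List.pySetD (PySem.List.pyGetD Map1 y []) x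
        (PySem.Dict.getD (PySem.Dict.ofList [(1, 3), (0, 4), (2, 4)]) v v)), true)

-- max(0, (c-1)//34)
def gridIdx (c : Int) : Int := max 0 (PySem.Int.floordiv (c - 1) 34)

def Player_shot_alt (Map1 : List (List Int)) (y : Int) (x : Int) : List (List Int) × Bool :=
  shotB Map1 (gridIdx y) (gridIdx x)

-- ===== PRECONDITION & SPEC =====
-- Pre_ excludes exactly the inputs whose computed grid cell is out of range: there Python A
-- raises IndexError (and B raises as well).
def Pre_Player_shot (Map1 : List (List Int)) (y : Int) (x : Int) : Prop :=
  gridIdx y < (Map1.length : Int) ∧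
  gridIdx x < ((Map1.getD (gridIdx y).toNat []).length : Int)
instance (Map1 : List (List Int)) (y : Int) (x : Int) : Decidable (Pre_Player_shot Map1 y x) := by
  unfold Pre_Player_shot; infer_instance

def pvWitness_Player_shot : List (List Int) × Int × Int := ([[1, 0], [0, 2]], 40, 1)

def Spec_Player_shot (Map1 : List (List Int)) (y : Int) (x : Int) (out : List (List Int) × Bool) : Prop := out = Player_shot_alt Map1 y x
instance (Map1 : List (List Int)) (y : Int) (x : Int) (out : List (List Int) × Bool) : Decidable (Spec_Player_shot Map1 y x out) := by unfold Spec_Player_shot; infer_instance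

-- ===== CLAIM (what is proved, stated in full; the proofs are below) =====
def Claim_equal_Player_shot : Prop := ∀ (Map1 : List (List Int)) (y : Int) (x : Int), Dom_Player_shot Map1 y x → Pre_Player_shot Map1 y x → Spec_Player_shot Map1 y x (Player_shot Map1 y x)

-- ===== LEMMAS AND PROOFS =====

lemma gridLoop_eq (n : Nat) : ∀ (c i : Int), (c - 34 * i).toNat ≤ n → 0 ≤ i → 34 * i < c →
    gridLoop c i = PySem.Int.floordiv (c - 1) 34 + 1 := by
  induction n with
  | zero => intro c i hn h0 h; omega
  | succ n ih =>
    intro c i hn h0 h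
    rw [gridLoop, if_pos (by omega : c - 34 * i > 0)]
    by_cases h2 : 34 * (i + 1) < c
    · exact ih c (i + 1) (by omega) (by omega) h2
    · rw [gridLoop, if_neg (by omega)]
      have hd : PySem.Int.floordiv (c - 1) 34 = i := by
        rw [PySem.Int.floordiv_eq_iff_of_pos (by omega)]
        omega
      omega

lemma idx_eq (c : Int) : (if c - 32 > 0 then gridLoop c 0 - 1 else 0) = gridIdx c := by
  by_cases h : c - 32 > 0
  · rw [if_pos h, gridLoop_eq (c - 0).toNat c 0 (by omega) le_rfl (by omega)]
    have h0 : (0 : Int) ≤ PySem.Int.floordiv (c - 1) 34 := by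
      rw [PySem.Int.le_floordiv_iff_mul_le (by omega)]; omega
    simp [gridIdx]; omega
  · rw [if_neg h]
    have h1 : ¬ (1 : Int) ≤ PySem.Int.floordiv (c - 1) 34 := by
      rw [PySem.Int.le_floordiv_iff_mul_le (by omega)]; omega
    simp [gridIdx]; omega

lemma dict_getD_other (v : Int) (h1 : v ≠ 1) (h0 : v ≠ 0) (h2 : v ≠ 2) :
    PySem.Dict.getD (PySem.Dict.ofList [((1:Int), (3:Int)), (0, 4), (2, 4)]) v v = v := by
  have hmk : PySem.Dict.ofList [((1:Int), (3:Int)), (0, 4), (2, 4)]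
      = PySem.Dict.mk [(1, 3), (0, 4), (2, 4)] := by rfl
  rw [hmk]
  simp [PySem.Dict.getD, PySem.Dict.get?,
    beq_eq_false_iff_ne.mpr (Ne.symm h1), beq_eq_false_iff_ne.mpr (Ne.symm h0),
    beq_eq_false_iff_ne.mpr (Ne.symm h2)]

lemma shot_eq (Map1 : List (List Int)) (yn xn : Nat)
    (hy : yn < Map1.length) (hx : xn < (Map1.getD yn []).length) :
    pyShot Map1 (yn : Int) (xn : Int) = shotB Map1 (yn : Int) (xn : Int) := by
  have hrow : Map1.getD yn [] = Map1[yn] := List.getD_eq_getElem _ _ hy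
  have hxn : xn < Map1[yn].length := by rw [← hrow]; exact hx
  have hv : PySem.List.pyGetD (PySem.List.pyGetD Map1 (yn : Int) []) (xn : Int) 0
      = Map1[yn][xn] := by
    rw [PySem.List.pyGetD_natCast, PySem.List.pyGetD_natCast, hrow,
      List.getD_eq_getElem _ _ hxn]
  by_cases h345 : Map1[yn][xn] = 3 ∨ Map1[yn][xn] = 4 ∨ Map1[yn][xn] = 5
  · simp only [pyShot, shotB, hv, if_pos h345]
  · by_cases h1 : Map1[yn][xn] = 1
    · -- A sets the cell to 3, re-reads 3 (not 0 or 2), leaves it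
      have hset : PySem.List.pySetD Map1 (yn : Int)
            (PySem.List.pySetD (PySem.List.pyGetD Map1 (yn : Int) []) (xn : Int) 3)
          = Map1.set yn (Map1[yn].set xn 3) := by
        rw [PySem.List.pyGetD_natCast, hrow, PySem.List.pySetD_natCast, PySem.List.pySetD_natCast]
      have e1 : (Map1.set yn (Map1[yn].set xn 3))[yn]? = some (Map1[yn].set xn 3) := by
        rw [List.getElem?_eq_getElem (by simpa using hy)]
        exact congrArg some (List.getElem_set_self (by simpa using hy))
      have e2 : (Map1[yn].set xn 3)[xn]? = some (3 : Int) := by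
        rw [List.getElem?_eq_getElem (by simpa using hxn)]
        exact congrArg some (List.getElem_set_self (by simpa using hxn))
      have e3 : Map1[yn]? = some Map1[yn] := List.getElem?_eq_getElem hy
      have dgd : PySem.Dict.getD (PySem.Dict.ofList [((1:Int), (3:Int)), (0, 4), (2, 4)]) 1 1
          = 3 := by decide
      simp only [pyShot, shotB, hv, if_neg h345, if_pos h1, hset]
      simp [e1, e2, e3, h1, dgd]
    · by_cases h02 : Map1[yn][xn] = 0 ∨ Map1[yn][xn] = 2
      · have hd : PySem.Dict.getD (PySem.Dict.ofList [((1:Int), (3:Int)), (0, 4), (2, 4)])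
            Map1[yn][xn] Map1[yn][xn] = 4 := by
          rcases h02 with h | h <;> rw [h] <;> decide
        simp only [pyShot, shotB, hv, if_neg h345, if_neg h1, if_pos h02, hd]
      · -- untouched cell: A changes nothing; B writes back the value already there
        have hd : PySem.Dict.getD (PySem.Dict.ofList [((1:Int), (3:Int)), (0, 4), (2, 4)])
            Map1[yn][xn] Map1[yn][xn] = Map1[yn][xn] :=
          dict_getD_other _ h1 (fun h => h02 (Or.inl h)) (fun h => h02 (Or.inr h))
        simp only [pyShot, shotB, hv, if_neg h345, if_neg h1, if_neg h02, hd]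
        rw [PySem.List.pyGetD_natCast, hrow, PySem.List.pySetD_natCast, PySem.List.pySetD_natCast,
          List.set_getElem_self hxn, List.set_getElem_self hy]

-- ===== VERDICT (by name: the statement is the Claim_ definition above) =====
theorem Player_shot_spec : Claim_equal_Player_shot := by
  intro Map1 y x _ hpre
  obtain ⟨hp1, hp2⟩ := hpre
  unfold Spec_Player_shot Player_shot Player_shot_alt
  rw [idx_eq x, idx_eq y]
  have hy0 : 0 ≤ gridIdx y := le_max_left _ _
  have hx0 : 0 ≤ gridIdx x := le_max_left _ _
  have hyc : gridIdx y = ((gridIdx y).toNat : Int) := by omega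
  have hxc : gridIdx x = ((gridIdx x).toNat : Int) := by omega
  rw [hyc, hxc]
  exact shot_eq Map1 (gridIdx y).toNat (gridIdx x).toNat (by omega) (by omega)
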